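-- pv_equiv track=rewrite | github.com/Tautulli/Tautulli | lib/cheroot/ssl/builtin.py | _make_env_san_dict
-- ===== SOURCE A (Python) =====
-- def _make_env_san_dict(env_prefix, cert_value):
--     """Return a dict of WSGI environment variables for a certificate DN.
--
--     E.g. SSL_CLIENT_SAN_Email_0, SSL_CLIENT_SAN_DNS_0, etc.
--     See SSL_CLIENT_SAN_* at
--     https://httpd.apache.org/docs/2.4/mod/mod_ssl.html#envvars.
--     """
--     if not cert_value:
--         return {}
--
--     env = {}
--     dns_count = 0
--     email_count = 0
--     for attr_name, val in cert_value:
--         if attr_name == 'DNS':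
--             env['%s_DNS_%i' % (env_prefix, dns_count)] = val
--             dns_count += 1
--         elif attr_name == 'Email':
--             env['%s_Email_%i' % (env_prefix, email_count)] = val
--             email_count += 1
--
--     # other mod_ssl SAN vars:
--     # - SAN_OTHER_msUPN_n
--     return env
-- ===== SOURCE B (Python) =====
-- def _make_env_san_dict(env_prefix, cert_value):
--     """Group-then-enumerate: collect SAN entries per category with their
--     positions, assign indices by enumerating each group, then restore the
--     original insertion order by sorting on position."""
--     dns = []
--     emails = []
--     for pos, (attr_name, val) in enumerate(cert_value):
--         if attr_name == 'DNS':
--             dns.append((pos, val))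
--         elif attr_name == 'Email':
--             emails.append((pos, val))
--     tagged = [(pos, '%s_DNS_%i' % (env_prefix, i), val)
--               for i, (pos, val) in enumerate(dns)]
--     tagged += [(pos, '%s_Email_%i' % (env_prefix, i), val)
--                for i, (pos, val) in enumerate(emails)]
--     tagged.sort(key=lambda t: t[0])
--     return {key: val for _, key, val in tagged}
-- ===== Notes on version B (the rewrite author's own statement) =====
-- stated objective: alternative
-- what changed: Replaced A's single pass with inline per-category counters by a two-phase group-then-enumerate: one pass groups DNS/Email values with their positions, then each group is enumerated to mint the numbered keys and the tagged entries are merged back into insertion order by a sort on position.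
import Mathlib
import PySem

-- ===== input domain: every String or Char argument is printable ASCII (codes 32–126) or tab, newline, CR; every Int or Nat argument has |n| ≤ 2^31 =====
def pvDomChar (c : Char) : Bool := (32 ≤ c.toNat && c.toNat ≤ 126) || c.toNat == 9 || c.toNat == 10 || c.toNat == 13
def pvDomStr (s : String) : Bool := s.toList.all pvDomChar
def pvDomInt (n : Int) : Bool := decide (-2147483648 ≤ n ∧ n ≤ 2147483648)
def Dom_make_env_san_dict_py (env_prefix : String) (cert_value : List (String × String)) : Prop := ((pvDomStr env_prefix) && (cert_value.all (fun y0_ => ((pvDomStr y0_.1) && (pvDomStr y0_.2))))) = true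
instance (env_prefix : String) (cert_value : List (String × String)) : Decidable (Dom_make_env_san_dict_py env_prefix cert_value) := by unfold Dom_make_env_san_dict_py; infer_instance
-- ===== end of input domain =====

-- B replaces A's one-pass counter loop by group-then-enumerate with a position sort restoring order (alternative decomposition, same results).


-- ===== PORT A =====
def make_env_san_dict_py (env_prefix : String) (cert_value : List (String × String)) : List (String × String) :=
  if cert_value = [] then []
  else
    (cert_value.foldl
      (fun (st : PySem.Dict String String × Int × Int) av =>
        if av.1 = "DNS" then
          (st.1.insert (env_prefix ++ "_DNS_" ++ PySem.Int.toStr st.2.1) av.2, st.2.1 + 1, st.2.2)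
        else if av.1 = "Email" then
          (st.1.insert (env_prefix ++ "_Email_" ++ PySem.Int.toStr st.2.2) av.2, st.2.1, st.2.2 + 1)
        else st)
      (PySem.Dict.empty, 0, 0)).1.items

-- ===== PORT B =====
def make_env_san_dict_py_alt (env_prefix : String) (cert_value : List (String × String)) : List (String × String) :=
  -- grouping pass: (dns, emails), each a list of (position, value)
  let grp := (PySem.List.enumerate cert_value 0).foldl
      (fun (g : List (Int × String) × List (Int × String)) pe =>
        if pe.2.1 = "DNS" then (g.1 ++ [(pe.1, pe.2.2)], g.2)
        else if pe.2.1 = "Email" then (g.1, g.2 ++ [(pe.1, pe.2.2)]) else g)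
      ([], [])
  -- emission pass: enumerate each group to mint keys, tag with original position
  let tagged :=
      (PySem.List.enumerate grp.1 0).map
        (fun ip => (ip.2.1, env_prefix ++ "_DNS_" ++ PySem.Int.toStr ip.1, ip.2.2))
      ++ (PySem.List.enumerate grp.2 0).map
        (fun ip => (ip.2.1, env_prefix ++ "_Email_" ++ PySem.Int.toStr ip.1, ip.2.2))
  -- tagged.sort(key=lambda t: t[0]) then dict comprehension over the sorted list
  let sortedT := PySem.List.sorted tagged (fun t => t.1) false
  (sortedT.foldl (fun (d : PySem.Dict String String) t => d.insert t.2.1 t.2.2) PySem.Dict.empty).items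

-- ===== PRECONDITION & SPEC =====
def Spec_make_env_san_dict_py (env_prefix : String) (cert_value : List (String × String)) (out : List (String × String)) : Prop := out = make_env_san_dict_py_alt env_prefix cert_value
instance (env_prefix : String) (cert_value : List (String × String)) (out : List (String × String)) : Decidable (Spec_make_env_san_dict_py env_prefix cert_value out) := by unfold Spec_make_env_san_dict_py; infer_instance

-- ===== CLAIM (what is proved, stated in full; the proofs are below) =====
def Claim_equal_make_env_san_dict_py : Prop := ∀ (env_prefix : String) (cert_value : List (String × String)), Dom_make_env_san_dict_py env_prefix cert_value → Spec_make_env_san_dict_py env_prefix cert_value (make_env_san_dict_py env_prefix cert_value)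

-- ===== LEMMAS AND PROOFS =====

-- canonical tagged emission: (position, key, value) for DNS/Email entries, in input order
def goSan (pref : String) : List (String × String) → Int → Int → Int → List (Int × String × String)
  | [], _, _, _ => []
  | (n, v) :: r, p, d, e =>
    if n = "DNS" then (p, pref ++ "_DNS_" ++ PySem.Int.toStr d, v) :: goSan pref r (p+1) (d+1) e
    else if n = "Email" then (p, pref ++ "_Email_" ++ PySem.Int.toStr e, v) :: goSan pref r (p+1) d (e+1)
    else goSan pref r (p+1) d e

-- the same emission without positions: (key, value) pairs
def goKV (pref : String) : List (String × String) → Int → Int → List (String × String)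
  | [], _, _ => []
  | (n, v) :: r, d, e =>
    if n = "DNS" then (pref ++ "_DNS_" ++ PySem.Int.toStr d, v) :: goKV pref r (d+1) e
    else if n = "Email" then (pref ++ "_Email_" ++ PySem.Int.toStr e, v) :: goKV pref r d (e+1)
    else goKV pref r d e

-- the two groups with positions, as B's first pass collects them
def dnsG : List (String × String) → Int → List (Int × String)
  | [], _ => []
  | (n, v) :: r, p => if n = "DNS" then (p, v) :: dnsG r (p+1) else dnsG r (p+1)

def emailG : List (String × String) → Int → List (Int × String)
  | [], _ => []
  | (n, v) :: r, p => if n = "Email" then (p, v) :: emailG r (p+1) else emailG r (p+1)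

theorem map_snd_goSan (pref : String) (cert : List (String × String)) (p d e : Int) :
    (goSan pref cert p d e).map (·.2) = goKV pref cert d e := by
  induction cert generalizing p d e with
  | nil => simp [goSan, goKV]
  | cons hd r ih =>
    obtain ⟨n, v⟩ := hd
    by_cases h1 : n = "DNS"
    · simp [goSan, goKV, h1, ih]
    · by_cases h2 : n = "Email" <;> simp [goSan, goKV, h1, h2, ih]

theorem goSan_lb (pref : String) (cert : List (String × String)) (p d e : Int) :
    ∀ t ∈ goSan pref cert p d e, p ≤ t.1 := by
  induction cert generalizing p d e with
  | nil => simp [goSan]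
  | cons hd r ih =>
    obtain ⟨n, v⟩ := hd
    intro t ht
    by_cases h1 : n = "DNS"
    · rw [goSan, if_pos h1] at ht
      rcases List.mem_cons.mp ht with h | h
      · subst h; simp
      · have := ih (p+1) (d+1) e t h; omega
    · by_cases h2 : n = "Email"
      · rw [goSan, if_neg h1, if_pos h2] at ht
        rcases List.mem_cons.mp ht with h | h
        · subst h; simp
        · have := ih (p+1) d (e+1) t h; omega
      · rw [goSan, if_neg h1, if_neg h2] at ht
        have := ih (p+1) d e t ht; omega

theorem goSan_pairwise (pref : String) (cert : List (String × String)) (p d e : Int) :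
    (goSan pref cert p d e).Pairwise (fun a b => a.1 < b.1) := by
  induction cert generalizing p d e with
  | nil => simp [goSan]
  | cons hd r ih =>
    obtain ⟨n, v⟩ := hd
    by_cases h1 : n = "DNS"
    · rw [goSan, if_pos h1]
      exact List.Pairwise.cons
        (fun b hb => by have := goSan_lb pref r (p+1) (d+1) e b hb; simp; omega) (ih _ _ _)
    · by_cases h2 : n = "Email"
      · rw [goSan, if_neg h1, if_pos h2]
        exact List.Pairwise.cons
          (fun b hb => by have := goSan_lb pref r (p+1) d (e+1) b hb; simp; omega) (ih _ _ _)
      · rw [goSan, if_neg h1, if_neg h2]; exact ih _ _ _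

-- A's loop computes the fold of inserts over goKV
theorem loopA_eq (pref : String) (cert : List (String × String))
    (env : PySem.Dict String String) (d e : Int) :
    (cert.foldl
      (fun (st : PySem.Dict String String × Int × Int) av =>
        if av.1 = "DNS" then
          (st.1.insert (pref ++ "_DNS_" ++ PySem.Int.toStr st.2.1) av.2, st.2.1 + 1, st.2.2)
        else if av.1 = "Email" then
          (st.1.insert (pref ++ "_Email_" ++ PySem.Int.toStr st.2.2) av.2, st.2.1, st.2.2 + 1)
        else st)
      (env, d, e)).1
      = (goKV pref cert d e).foldl (fun dct kv => dct.insert kv.1 kv.2) env := by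
  induction cert generalizing env d e with
  | nil => rfl
  | cons hd r ih =>
    obtain ⟨n, v⟩ := hd
    by_cases h1 : n = "DNS"
    · simp [goKV, h1, ih]
    · by_cases h2 : n = "Email" <;> simp [goKV, h1, h2, ih]

-- B's grouping pass computes (dnsG, emailG)
theorem grp_eq (cert : List (String × String)) (p : Int)
    (a1 a2 : List (Int × String)) :
    (PySem.List.enumerate cert p).foldl
      (fun (g : List (Int × String) × List (Int × String)) pe =>
        if pe.2.1 = "DNS" then (g.1 ++ [(pe.1, pe.2.2)], g.2)
        else if pe.2.1 = "Email" then (g.1, g.2 ++ [(pe.1, pe.2.2)]) else g)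
      (a1, a2)
      = (a1 ++ dnsG cert p, a2 ++ emailG cert p) := by
  induction cert generalizing p a1 a2 with
  | nil => simp [PySem.List.enumerate_nil, dnsG, emailG]
  | cons hd r ih =>
    obtain ⟨n, v⟩ := hd
    rw [PySem.List.enumerate_cons]
    by_cases h1 : n = "DNS"
    · simp [dnsG, emailG, h1, ih]
    · by_cases h2 : n = "Email" <;> simp [dnsG, emailG, h1, h2, ih]

-- B's tagged list is a permutation of goSan
theorem tagged_perm (pref : String) (cert : List (String × String)) (p d e : Int) :
    (goSan pref cert p d e).Perm
      ((PySem.List.enumerate (dnsG cert p) d).map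
          (fun ip => (ip.2.1, pref ++ "_DNS_" ++ PySem.Int.toStr ip.1, ip.2.2))
        ++ (PySem.List.enumerate (emailG cert p) e).map
          (fun ip => (ip.2.1, pref ++ "_Email_" ++ PySem.Int.toStr ip.1, ip.2.2))) := by
  induction cert generalizing p d e with
  | nil => simp [goSan, dnsG, emailG, PySem.List.enumerate_nil]
  | cons hd r ih =>
    obtain ⟨n, v⟩ := hd
    by_cases h1 : n = "DNS"
    · rw [goSan, if_pos h1, dnsG, if_pos h1, emailG, if_neg (h1 ▸ (by decide : ("DNS" : String) ≠ "Email")),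
          PySem.List.enumerate_cons]
      simpa using (ih (p+1) (d+1) e).cons (p, pref ++ "_DNS_" ++ PySem.Int.toStr d, v)
    · by_cases h2 : n = "Email"
      · rw [goSan, if_neg h1, if_pos h2, dnsG, if_neg h1, emailG, if_pos h2,
            PySem.List.enumerate_cons]
        simp only [List.map_cons]
        exact ((ih (p+1) d (e+1)).cons (p, pref ++ "_Email_" ++ PySem.Int.toStr e, v)).trans
          List.perm_middle.symm
      · rw [goSan, if_neg h1, if_neg h2, dnsG, if_neg h1, emailG, if_neg h2]
        exact ih (p+1) d e

-- folding triples through their (key, value) projection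
theorem foldl_snd (l : List (Int × String × String)) (dct : PySem.Dict String String) :
    l.foldl (fun d t => d.insert t.2.1 t.2.2) dct
      = (l.map (·.2)).foldl (fun d kv => d.insert kv.1 kv.2) dct := by
  induction l generalizing dct with
  | nil => rfl
  | cons hd tl ih => simp [ih]

-- ===== VERDICT (by name: the statement is the Claim_ definition above) =====
theorem make_env_san_dict_py_spec : Claim_equal_make_env_san_dict_py := by
  intro pref cert _
  show make_env_san_dict_py pref cert = make_env_san_dict_py_alt pref cert
  unfold make_env_san_dict_py make_env_san_dict_py_alt
  rw [grp_eq cert 0 [] []]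
  simp only [List.nil_append]
  have hs := PySem.List.sorted_eq_of_perm_of_pairwise_lt _ _
      (fun t : Int × String × String => t.1)
      (tagged_perm pref cert 0 0 0) (goSan_pairwise pref cert 0 0 0)
  rw [hs, foldl_snd, map_snd_goSan, loopA_eq pref cert PySem.Dict.empty 0 0]
  cases cert with
  | nil => rfl
  | cons hd r => rw [if_neg (by simp)]
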